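-- pv_equiv track=rewrite | github.com/amateurcoder015/F1_project | 1b.py | role_bonus
-- ===== SOURCE A (Python) =====
-- def role_bonus(team):
--     has_opener = any("opener" in p["strengths"] for p in team)
--     has_bowler = any("death_bowling" in p["strengths"] or "swing_bowling" in p["strengths"] or "spin_bowling" in p["strengths"] or "leg_spin" in p["strengths"] for p in team)
--     has_finisher = any("finisher" in p["strengths"] for p in team)
--     has_wicketkeeper = any("wicketkeeping" in p["strengths"] for p in team)
--     bonus = 0
--     if has_opener: bonus += 1
--     if has_bowler: bonus += 1
--     if has_finisher: bonus += 1
--     if has_wicketkeeper: bonus += 1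
--     return bonus
-- ===== SOURCE B (Python) =====
-- def role_bonus(team):
--     has_opener = has_bowler = has_finisher = has_wicketkeeper = False
--     for p in team:
--         s = p["strengths"]
--         if "opener" in s:
--             has_opener = True
--         if "death_bowling" in s or "swing_bowling" in s or "spin_bowling" in s or "leg_spin" in s:
--             has_bowler = True
--         if "finisher" in s:
--             has_finisher = True
--         if "wicketkeeping" in s:
--             has_wicketkeeper = True
--         if has_opener and has_bowler and has_finisher and has_wicketkeeper:
--             break
--     return int(has_opener) + int(has_bowler) + int(has_finisher) + int(has_wicketkeeper)
-- ===== Notes on version B (the rewrite author's own statement) =====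
-- stated objective: simpler
-- what changed: Four independent any() scans over the team become one early-exiting pass maintaining four boolean flags.
import Mathlib
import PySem

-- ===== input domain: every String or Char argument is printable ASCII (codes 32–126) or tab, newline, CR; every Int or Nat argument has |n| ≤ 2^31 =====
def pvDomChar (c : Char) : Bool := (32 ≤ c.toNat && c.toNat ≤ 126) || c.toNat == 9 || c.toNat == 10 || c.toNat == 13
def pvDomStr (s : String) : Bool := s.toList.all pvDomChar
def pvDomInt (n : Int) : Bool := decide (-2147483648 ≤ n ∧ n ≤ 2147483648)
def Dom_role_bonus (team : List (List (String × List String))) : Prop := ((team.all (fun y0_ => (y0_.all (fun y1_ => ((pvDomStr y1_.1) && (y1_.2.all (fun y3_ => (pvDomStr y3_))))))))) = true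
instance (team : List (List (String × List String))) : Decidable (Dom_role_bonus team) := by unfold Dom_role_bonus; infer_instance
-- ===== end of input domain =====

-- B does one early-exiting pass with four boolean flags instead of A's four any() scans (simpler, same cost).

-- ===== PORT A =====
-- p["strengths"] is PySem.Dict.getD (PySem.Dict.mk p) "strengths" []; under Pre_ the key is present, so getD = the Python lookup.
def role_bonus (team : List (List (String × List String))) : Int :=
  let has_opener := team.any (fun p => (PySem.Dict.getD (PySem.Dict.mk p) "strengths" []).contains "opener")
  let has_bowler := team.any (fun p =>
    (PySem.Dict.getD (PySem.Dict.mk p) "strengths" []).contains "death_bowling" ||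
    (PySem.Dict.getD (PySem.Dict.mk p) "strengths" []).contains "swing_bowling" ||
    (PySem.Dict.getD (PySem.Dict.mk p) "strengths" []).contains "spin_bowling" ||
    (PySem.Dict.getD (PySem.Dict.mk p) "strengths" []).contains "leg_spin")
  let has_finisher := team.any (fun p => (PySem.Dict.getD (PySem.Dict.mk p) "strengths" []).contains "finisher")
  let has_wicketkeeper := team.any (fun p => (PySem.Dict.getD (PySem.Dict.mk p) "strengths" []).contains "wicketkeeping")
  let bonus : Int := 0
  let bonus := if has_opener then bonus + 1 else bonus
  let bonus := if has_bowler then bonus + 1 else bonus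
  let bonus := if has_finisher then bonus + 1 else bonus
  let bonus := if has_wicketkeeper then bonus + 1 else bonus
  bonus

-- ===== PORT B =====
-- the single early-exiting loop of Source B, carrying the four flags
def roleLoop : List (List (String × List String)) → Bool → Bool → Bool → Bool → Bool × Bool × Bool × Bool
  | [], o, b, f, w => (o, b, f, w)
  | p :: rest, o, b, f, w =>
    let s := PySem.Dict.getD (PySem.Dict.mk p) "strengths" []
    let o := o || s.contains "opener"
    let b := b || (s.contains "death_bowling" || s.contains "swing_bowling" ||
                   s.contains "spin_bowling" || s.contains "leg_spin")
    let f := f || s.contains "finisher"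
    let w := w || s.contains "wicketkeeping"
    if o && b && f && w then (o, b, f, w) else roleLoop rest o b f w

def role_bonus_alt (team : List (List (String × List String))) : Int :=
  let r := roleLoop team false false false false
  (if r.1 then (1 : Int) else 0) + (if r.2.1 then 1 else 0) +
  (if r.2.2.1 then 1 else 0) + (if r.2.2.2 then 1 else 0)

-- ===== PRECONDITION & SPEC =====
-- Pre_ excludes teams in which some player dict lacks the "strengths" key: there A (and B) raise
-- KeyError, except in the rare case that every scan short-circuits before the malformed player,
-- where A and B both still return the same value (see the cite in claim.json).
def Pre_role_bonus (team : List (List (String × List String))) : Prop :=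
  ∀ p ∈ team, (p.map Prod.fst).contains "strengths" = true
instance (team : List (List (String × List String))) : Decidable (Pre_role_bonus team) := by
  unfold Pre_role_bonus; infer_instance

def pvWitness_role_bonus : (List (List (String × List String))) :=
  [[("strengths", ["opener", "death_bowling"])], [("strengths", ["wicketkeeping"])]]

def Spec_role_bonus (team : List (List (String × List String))) (out : Int) : Prop := out = role_bonus_alt team
instance (team : List (List (String × List String))) (out : Int) : Decidable (Spec_role_bonus team out) := by unfold Spec_role_bonus; infer_instance

-- ===== CLAIM (what is proved, stated in full; the proofs are below) =====
def Claim_equal_role_bonus : Prop := ∀ (team : List (List (String × List String))), Dom_role_bonus team → Pre_role_bonus team → Spec_role_bonus team (role_bonus team)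

-- ===== LEMMAS AND PROOFS =====

-- The loop with early exit computes the accumulators OR-ed with the four whole-list any-scans.
theorem roleLoop_eq (team : List (List (String × List String))) :
    ∀ o b f w, roleLoop team o b f w =
      (o || team.any (fun p => (PySem.Dict.getD (PySem.Dict.mk p) "strengths" []).contains "opener"),
       b || team.any (fun p =>
         (PySem.Dict.getD (PySem.Dict.mk p) "strengths" []).contains "death_bowling" ||
         (PySem.Dict.getD (PySem.Dict.mk p) "strengths" []).contains "swing_bowling" ||
         (PySem.Dict.getD (PySem.Dict.mk p) "strengths" []).contains "spin_bowling" ||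
         (PySem.Dict.getD (PySem.Dict.mk p) "strengths" []).contains "leg_spin"),
       f || team.any (fun p => (PySem.Dict.getD (PySem.Dict.mk p) "strengths" []).contains "finisher"),
       w || team.any (fun p => (PySem.Dict.getD (PySem.Dict.mk p) "strengths" []).contains "wicketkeeping")) := by
  induction team with
  | nil => intro o b f w; simp [roleLoop]
  | cons p rest ih =>
    intro o b f w
    simp only [roleLoop, List.any_cons]
    split
    · rename_i h
      simp only [Bool.and_eq_true] at h
      obtain ⟨⟨⟨ho, hb⟩, hf⟩, hw⟩ := h
      have go : ∀ (x c r : Bool), (x || c) = true → (x || c) = (x || (c || r)) := by decide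
      exact Prod.ext (go _ _ _ ho) (Prod.ext (go _ _ _ hb) (Prod.ext (go _ _ _ hf) (go _ _ _ hw)))
    · rw [ih]
      refine Prod.ext ?_ (Prod.ext ?_ (Prod.ext ?_ ?_)) <;> simp [Bool.or_assoc]

-- ===== VERDICT (by name: the statement is the Claim_ definition above) =====
theorem role_bonus_spec : Claim_equal_role_bonus := by
  intro team _ _
  unfold Spec_role_bonus role_bonus role_bonus_alt
  rw [roleLoop_eq]
  simp only [Bool.false_or]
  split_ifs <;> simp_all
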